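-- pv_equiv track=rewrite | github.com/fl3ur1nestimable/wordle | Wordle/python/pages/stats.py | getSeries
-- ===== SOURCE A (Python) =====
-- def getSeries(data):
--     seriesList=[]
--     serie=0
--     for i in range(len(data)):
--         if data[i][2]=='win':
--             serie+=1
--         else:
--             seriesList.append(serie)
--             serie=0
--     seriesList.append(serie)
--     seriesList=[x for x in seriesList if x != 0]
--     actual=seriesList[-1]
--     best=max(seriesList)
--     return (actual,best)
-- ===== SOURCE B (Python) =====
-- def getSeries(data):
--     wins = [row[2] == 'win' for row in data]
--     streaks = []
--     i, n = 0, len(wins)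
--     while i < n:
--         if wins[i]:
--             j = i + 1
--             while j < n and wins[j]:
--                 j += 1
--             streaks.append(j - i)
--             i = j
--         else:
--             i += 1
--     return (streaks[-1], max(streaks))
-- ===== Notes on version B (the rewrite author's own statement) =====
-- stated objective: alternative
-- what changed: A keeps a running counter, appends it on every loss (and once at the end) and filters out the zeros; B maps rows to win flags and scans with an index that jumps over each whole win run, collecting the run lengths directly, so no zero sentinels or filtering pass exist.
import Mathlib
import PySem

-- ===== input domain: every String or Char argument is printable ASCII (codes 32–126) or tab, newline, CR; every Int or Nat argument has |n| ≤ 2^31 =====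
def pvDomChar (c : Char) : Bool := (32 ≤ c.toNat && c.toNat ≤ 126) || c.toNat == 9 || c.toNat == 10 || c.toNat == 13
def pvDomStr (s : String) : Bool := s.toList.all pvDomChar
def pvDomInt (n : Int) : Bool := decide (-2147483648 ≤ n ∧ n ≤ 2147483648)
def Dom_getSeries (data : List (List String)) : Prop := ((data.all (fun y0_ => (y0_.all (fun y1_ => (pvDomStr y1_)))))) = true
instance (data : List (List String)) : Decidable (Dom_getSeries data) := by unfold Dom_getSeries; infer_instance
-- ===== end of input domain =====

-- B replaces A's counter-and-filter accumulation by a run-jumping scan that collects win-run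
-- lengths directly (objective: alternative decomposition, same O(n) cost).

-- ===== PORT A =====
-- A's loop 'for i in range(len(data)): if data[i][2]=="win": serie+=1 else: append serie; serie=0'
-- as a fold over range(len(data)); pyGetD defaults are only reached outside Pre_.
def getSeries (data : List (List String)) : Int × Int :=
  let st := (PySem.List.pyRange 0 data.length 1).foldl
    (fun (p : List Int × Int) i =>
      if PySem.List.pyGetD (PySem.List.pyGetD data i []) 2 "" = "win"
      then (p.1, p.2 + 1)
      else (p.1 ++ [p.2], 0)) ([], 0)
  let seriesList := (st.1 ++ [st.2]).filter (fun x => x ≠ 0)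
  (((PySem.List.pyGet? seriesList (-1)).getD 0),
   ((PySem.List.max? seriesList (fun x => x)).getD 0))

-- ===== PORT B =====
-- Source B's outer while loop: skip a loss, or consume a whole win run and record its length
-- (the inner 'while j < n and wins[j]: j += 1' is the takeWhile/dropWhile of the run).
def pvRuns : List Bool → List Int
  | [] => []
  | false :: t => pvRuns t
  | true :: t =>
      (((t.takeWhile (fun b => b)).length : Int) + 1) :: pvRuns (t.dropWhile (fun b => b))
termination_by ws => ws.length
decreasing_by
  · simp
  · simpa [Nat.lt_succ_iff] using List.length_dropWhile_le (fun b => b) t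

def getSeries_alt (data : List (List String)) : Int × Int :=
  let wins := data.map (fun row => decide (PySem.List.pyGetD row 2 "" = "win"))
  let streaks := pvRuns wins
  (((PySem.List.pyGet? streaks (-1)).getD 0),
   ((PySem.List.max? streaks (fun x => x)).getD 0))

-- ===== PRECONDITION & SPEC =====
-- Pre_ excludes exactly the inputs where the Python A raises: a row shorter than 3 entries
-- (IndexError on data[i][2]) or no winning row at all (seriesList empty → IndexError on [-1]).
def Pre_getSeries (data : List (List String)) : Prop :=
  (∀ row ∈ data, 3 ≤ row.length) ∧ (∃ row ∈ data, row.getD 2 "" = "win")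
instance (data : List (List String)) : Decidable (Pre_getSeries data) := by
  unfold Pre_getSeries; infer_instance
def pvWitness_getSeries : List (List String) :=
  [["a", "b", "win"], ["a", "b", "loss"], ["a", "b", "win"]]
def Spec_getSeries (data : List (List String)) (out : Int × Int) : Prop := out = getSeries_alt data
instance (data : List (List String)) (out : Int × Int) : Decidable (Spec_getSeries data out) := by unfold Spec_getSeries; infer_instance

-- ===== CLAIM (what is proved, stated in full; the proofs are below) =====
def Claim_equal_getSeries : Prop := ∀ (data : List (List String)), Dom_getSeries data → Pre_getSeries data → Spec_getSeries data (getSeries data)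

-- ===== LEMMAS AND PROOFS =====

-- A's pending-counter state, read off as the final list of nonzero run lengths.
theorem pvRuns_nil : pvRuns [] = [] := by rw [pvRuns]
theorem pvRuns_false (t : List Bool) : pvRuns (false :: t) = pvRuns t := by rw [pvRuns]
theorem pvRuns_true (t : List Bool) :
    pvRuns (true :: t)
      = (((t.takeWhile (fun b => b)).length : Int) + 1) :: pvRuns (t.dropWhile (fun b => b)) := by
  rw [pvRuns]

def pvAux (c : Int) : List Bool → List Int
  | [] => if c = 0 then [] else [c]
  | true :: t => pvAux (c + 1) t
  | false :: t => if c = 0 then pvAux 0 t else c :: pvAux 0 t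

theorem pvAux_spec (t : List Bool) : ∀ c : Int, 0 ≤ c →
    pvAux c t = if c = 0 then pvRuns t
      else (((t.takeWhile (fun b => b)).length : Int) + c) :: pvRuns (t.dropWhile (fun b => b)) := by
  induction t with
  | nil =>
    intro c _
    by_cases hc : c = 0 <;> simp [pvAux, pvRuns_nil, hc]
  | cons b t ih =>
    intro c hc
    cases b with
    | true =>
      rw [pvAux, ih (c + 1) (by omega), if_neg (by omega)]
      by_cases h0 : c = 0
      · rw [if_pos h0, h0, pvRuns_true]
        simp
      · rw [if_neg h0]
        simp
        omega
    | false =>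
      rw [pvAux]
      by_cases h0 : c = 0
      · rw [if_pos h0, if_pos h0, ih 0 (by omega), if_pos rfl, pvRuns_false]
      · rw [if_neg h0, if_neg h0, ih 0 (by omega), if_pos rfl]
        simp [pvRuns_false]

theorem pvAux_zero (t : List Bool) : pvAux 0 t = pvRuns t := by
  rw [pvAux_spec t 0 (by omega), if_pos rfl]

-- A's fold, run over the Bool list of win flags.
def pvStepB (p : List Int × Int) (b : Bool) : List Int × Int :=
  if b then (p.1, p.2 + 1) else (p.1 ++ [p.2], 0)

theorem pvFold_filter (ws : List Bool) : ∀ (sl : List Int) (c : Int),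
    (((ws.foldl pvStepB (sl, c)).1 ++ [(ws.foldl pvStepB (sl, c)).2]).filter (fun x => x ≠ 0))
      = sl.filter (fun x => x ≠ 0) ++ pvAux c ws := by
  induction ws with
  | nil =>
    intro sl c
    by_cases hc : c = 0 <;> simp [pvAux, List.filter_append, hc]
  | cons b t ih =>
    intro sl c
    cases b with
    | true => rw [List.foldl_cons, pvStepB, if_pos rfl, ih, pvAux]
    | false =>
      rw [List.foldl_cons, pvStepB, if_neg (by simp), ih, pvAux]
      by_cases hc : c = 0 <;> simp [List.filter_append, hc]

-- The two streak lists coincide (for every input).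
theorem pvLists_eq (data : List (List String)) :
    (((PySem.List.pyRange 0 data.length 1).foldl
        (fun (p : List Int × Int) i =>
          if PySem.List.pyGetD (PySem.List.pyGetD data i []) 2 "" = "win"
          then (p.1, p.2 + 1)
          else (p.1 ++ [p.2], 0)) ([], 0)).1
      ++ [((PySem.List.pyRange 0 data.length 1).foldl
        (fun (p : List Int × Int) i =>
          if PySem.List.pyGetD (PySem.List.pyGetD data i []) 2 "" = "win"
          then (p.1, p.2 + 1)
          else (p.1 ++ [p.2], 0)) ([], 0)).2]).filter (fun x => x ≠ 0)
      = pvRuns (data.map (fun row => decide (PySem.List.pyGetD row 2 "" = "win"))) := by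
  have h1 := PySem.List.foldl_pyRange_zero_pyGetD' data ([] : List String)
      (fun (p : List Int × Int) r =>
        if PySem.List.pyGetD r 2 "" = "win" then (p.1, p.2 + 1) else (p.1 ++ [p.2], 0))
      (([], 0) : List Int × Int)
  rw [h1]
  have h2 : data.foldl
      (fun (p : List Int × Int) r =>
        if PySem.List.pyGetD r 2 "" = "win" then (p.1, p.2 + 1) else (p.1 ++ [p.2], 0)) ([], 0)
      = (data.map (fun row => decide (PySem.List.pyGetD row 2 "" = "win"))).foldl pvStepB ([], 0) := by
    rw [List.foldl_map]
    apply PySem.List.foldl_congr_mem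
    intro acc x _
    by_cases h : PySem.List.pyGetD x 2 "" = "win" <;> simp [pvStepB, h]
  rw [h2, pvFold_filter, pvAux_zero]
  simp

-- ===== VERDICT (by name: the statement is the Claim_ definition above) =====
theorem getSeries_spec : Claim_equal_getSeries := by
  intro data _ _
  unfold Spec_getSeries getSeries getSeries_alt
  simp only []
  rw [pvLists_eq data]
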